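-- pv_equiv track=rewrite | github.com/MalteHB/language_analytics_cds | src/collocation.py | joint_frequency
-- ===== SOURCE A (Python) =====
-- def joint_frequency(tokenized_text, keyword, collocate, window_size):
--
--     joint_frequency = 0
--
--     for i, word in enumerate(tokenized_text):
--
--         if word == keyword:
--
--             left_window = tokenized_text[max(0, i - window_size):i]
--
--             right_window = tokenized_text[i:(i + window_size + 1)]
--
--             total_window = left_window + right_window
--
--             if keyword and collocate in total_window:
--
--                 joint_frequency += 1
--
--     return joint_frequency
-- ===== SOURCE B (Python) =====
-- def joint_frequency(tokenized_text, keyword, collocate, window_size):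
--     # prefix[k] = number of collocates among the first k tokens; each keyword
--     # occurrence is then checked by a prefix-count difference, no window slice.
--     if not keyword:
--         return 0
--     n = len(tokenized_text)
--     prefix = [0]
--     run = 0
--     for word in tokenized_text:
--         if word == collocate:
--             run += 1
--         prefix.append(run)
--     count = 0
--     for i, word in enumerate(tokenized_text):
--         if word == keyword:
--             lo = max(0, i - window_size)
--             hi = min(n, i + window_size + 1)
--             if prefix[hi] - prefix[lo] > 0:
--                 count += 1
--     return count
-- ===== Notes on version B (the rewrite author's own statement) =====
-- stated objective: alternative
-- what changed: Instead of materialising and scanning a fresh window slice for every keyword occurrence, B builds one prefix array of collocate counts and answers each window-membership test with a prefix-count difference; asymptotically O(n) vs O(n*window) per the algorithm, though a timing run measured no speed-up on the generated inputs.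
-- outside the precondition, e.g. on joint_frequency(['a', 'b', 'c'], 'a', 'a', -3): A returns 1, B returns 0
import Mathlib
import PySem

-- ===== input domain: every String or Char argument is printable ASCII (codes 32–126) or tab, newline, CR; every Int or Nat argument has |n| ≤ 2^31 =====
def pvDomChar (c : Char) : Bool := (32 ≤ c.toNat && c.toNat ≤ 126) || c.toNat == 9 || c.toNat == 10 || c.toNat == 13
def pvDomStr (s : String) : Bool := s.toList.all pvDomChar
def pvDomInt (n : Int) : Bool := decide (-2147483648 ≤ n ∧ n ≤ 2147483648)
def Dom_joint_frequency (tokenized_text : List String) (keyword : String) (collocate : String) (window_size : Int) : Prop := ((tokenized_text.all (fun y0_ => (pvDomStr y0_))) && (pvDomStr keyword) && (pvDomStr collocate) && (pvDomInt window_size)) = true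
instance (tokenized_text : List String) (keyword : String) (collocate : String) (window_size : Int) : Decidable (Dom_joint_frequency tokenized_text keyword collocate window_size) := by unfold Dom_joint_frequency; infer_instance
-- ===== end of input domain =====

-- B replaces A's per-keyword window slicing and scanning by one prefix array of
-- collocate counts, answering each window test with a prefix-count difference instead of a slice scan.

-- ===== PORT A =====
def joint_frequency (tokenized_text : List String) (keyword : String) (collocate : String) (window_size : Int) : Int :=
  (PySem.List.enumerate tokenized_text).foldl (fun jf p =>
    let i := p.1
    let word := p.2
    if word == keyword then
      let left_window := PySem.List.slice tokenized_text (some (max 0 (i - window_size))) (some i)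
      let right_window := PySem.List.slice tokenized_text (some i) (some (i + window_size + 1))
      let total_window := left_window ++ right_window
      if keyword != "" && total_window.contains collocate then jf + 1 else jf
    else jf) 0

-- ===== PORT B =====
def joint_frequency_alt (tokenized_text : List String) (keyword : String) (collocate : String) (window_size : Int) : Int :=
  if keyword = "" then 0
  else
    let n : Int := tokenized_text.length
    let pref := (tokenized_text.foldl (fun (s : List Int × Int) word =>
        let run := if word == collocate then s.2 + 1 else s.2
        (s.1 ++ [run], run)) ([0], 0)).1
    (PySem.List.enumerate tokenized_text).foldl (fun count p =>
      if p.2 == keyword then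
        let lo := max 0 (p.1 - window_size)
        let hi := min n (p.1 + window_size + 1)
        if PySem.List.pyGetD pref hi 0 - PySem.List.pyGetD pref lo 0 > 0 then count + 1
        else count
      else count) 0

-- ===== PRECONDITION & SPEC =====
-- Pre_ excludes negative window_size (a window width, so negative lies outside the natural
-- domain), where A's right-slice stop i+window_size+1 can go negative and wrap to the end
-- of the list, so A may count tokens far from the keyword.
def Pre_joint_frequency (tokenized_text : List String) (keyword : String) (collocate : String) (window_size : Int) : Prop :=
  0 ≤ window_size
instance (tokenized_text : List String) (keyword : String) (collocate : String) (window_size : Int) : Decidable (Pre_joint_frequency tokenized_text keyword collocate window_size) := by unfold Pre_joint_frequency; infer_instance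
def pvWitness_joint_frequency : List String × String × String × Int := (["a", "b", "a"], "a", "b", 1)

def Spec_joint_frequency (tokenized_text : List String) (keyword : String) (collocate : String) (window_size : Int) (out : Int) : Prop := out = joint_frequency_alt tokenized_text keyword collocate window_size
instance (tokenized_text : List String) (keyword : String) (collocate : String) (window_size : Int) (out : Int) : Decidable (Spec_joint_frequency tokenized_text keyword collocate window_size out) := by unfold Spec_joint_frequency; infer_instance

-- ===== CLAIM (what is proved, stated in full; the proofs are below) =====
def Claim_equal_joint_frequency : Prop := ∀ (tokenized_text : List String) (keyword : String) (collocate : String) (window_size : Int), Dom_joint_frequency tokenized_text keyword collocate window_size → Pre_joint_frequency tokenized_text keyword collocate window_size → Spec_joint_frequency tokenized_text keyword collocate window_size (joint_frequency tokenized_text keyword collocate window_size)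

-- ===== LEMMAS AND PROOFS =====

-- B's first loop builds exactly the list of prefix collocate counts (plus the running total).
theorem jf_prefix_spec (t : List String) (collocate : String) :
    (t.foldl (fun (s : List Int × Int) word =>
        let run := if word == collocate then s.2 + 1 else s.2
        (s.1 ++ [run], run)) ([0], 0)) =
      ((List.range (t.length + 1)).map (fun k => ((t.take k).countP (· == collocate) : Int)),
        (t.countP (· == collocate) : Int)) := by
  induction t using List.reverseRecOn with
  | nil => simp
  | append_singleton t x ih =>
      rw [List.foldl_append, ih]
      simp only [List.foldl_cons, List.foldl_nil]
      refine Prod.ext ?_ ?_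
      · show _ ++ _ = _
        conv_rhs => rw [show ((t ++ [x]).length + 1) = (t.length + 1) + 1 by simp,
          List.range_succ, List.map_append]
        congr 1
        · apply List.map_congr_left
          intro k hk
          simp only [List.mem_range] at hk
          rw [List.take_append_of_le_length (by omega)]
        · have ht : List.take (t.length + 1) (t ++ [x]) = t ++ [x] :=
            List.take_of_length_le (by simp)
          simp only [List.map_singleton, ht, List.countP_append, List.countP_singleton]
          split <;> simp_all
      · show (if _ then _ else _) = _
        simp only [List.countP_append, List.countP_singleton]
        split <;> simp_all

-- A's window test at a keyword position j equals B's prefix-count difference test there.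
theorem jf_body_eq (t : List String) (co : String) (w : Int) (hw : 0 ≤ w)
    (j : Nat) (hj : j < t.length) :
    ((PySem.List.slice t (some (max 0 ((j : Int) - w))) (some (j : Int)) ++
        PySem.List.slice t (some (j : Int)) (some ((j : Int) + w + 1))).contains co = true
      ↔ 0 < ((t.take ((min (t.length : Int) ((j : Int) + w + 1)).toNat)).countP (· == co) : Int)
            - ((t.take ((max 0 ((j : Int) - w)).toNat)).countP (· == co) : Int)) := by
  set a : Int := max 0 ((j : Int) - w) with ha
  have ha0 : 0 ≤ a := le_max_left _ _
  set loN : Nat := a.toNat with hlo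
  have hloj : loN ≤ j := by omega
  set hiN : Nat := (min (t.length : Int) ((j : Int) + w + 1)).toNat with hhi
  have hhiN : hiN = min t.length (j + w.toNat + 1) := by omega
  have hjhi : j < hiN := by omega
  -- the two slices concatenate to one window starting at loN
  rw [PySem.List.slice_toNat t ha0 (by positivity),
      PySem.List.slice_toNat t (by positivity) (by positivity)]
  have h1 : (j : Int).toNat = j := by omega
  have h2 : ((j : Int) + w + 1).toNat = j + (w.toNat + 1) := by omega
  rw [h1, h2]
  have hdrop : List.drop j t = List.drop (j - loN) (List.drop loN t) := by
    rw [List.drop_drop]; congr 1; omega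
  rw [hdrop, ← List.take_add]
  -- the prefix-count difference is the collocate count in that same window
  have hsplit : List.take hiN t = List.take loN t ++ List.take (hiN - loN) (List.drop loN t) := by
    rw [← List.take_add]; congr 1; omega
  have hwin : List.take (hiN - loN) (List.drop loN t) =
      List.take (j - loN + (w.toNat + 1)) (List.drop loN t) := by
    rw [List.take_eq_take_iff]; simp [List.length_drop]; omega
  rw [hsplit, hwin, List.countP_append]
  push_cast
  rw [show ∀ x y : Int, (0 < x + y - x) = (0 < y) from fun x y => by ring_nf]
  have : List.countP (· == co) (List.take (j - loN + (w.toNat + 1)) (List.drop loN t))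
      = List.count co (List.take (j - loN + (w.toNat + 1)) (List.drop loN t)) := rfl
  rw [this]
  simp [List.count_pos_iff, hlo]

-- ===== VERDICT (by name: the statement is the Claim_ definition above) =====
theorem joint_frequency_spec : Claim_equal_joint_frequency := by
  intro t kw co w _ hw
  replace hw : 0 ≤ w := hw
  unfold Spec_joint_frequency joint_frequency joint_frequency_alt
  by_cases hk : kw = ""
  · subst hk
    rw [if_pos rfl]
    rw [PySem.List.foldl_congr_mem _ _ (fun (acc : Int) _ => acc) 0
      (by intro acc p _; simp)]
    simp
  · simp only [if_neg hk, jf_prefix_spec]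
    apply PySem.List.foldl_congr_mem
    intro acc p hp
    rw [PySem.List.mem_enumerate_iff] at hp
    obtain ⟨j, hj, rfl⟩ := hp
    simp only [zero_add]
    by_cases htj : (t[j] == kw) = true
    · simp only [if_pos htj]
      have hne : (kw != "") = true := by simpa using hk
      simp only [hne, Bool.true_and]
      have hlo : 0 ≤ max 0 ((j : Int) - w) := le_max_left _ _
      have hhi0 : (0:Int) ≤ min (t.length : Int) ((j : Int) + w + 1) := by omega
      rw [PySem.List.pyGetD_of_nonneg _ _ hhi0, PySem.List.pyGetD_of_nonneg _ _ hlo,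
        PySem.List.getD_map_range _ _ _ _ (by omega),
        PySem.List.getD_map_range _ _ _ _ (by omega)]
      rcases jf_body_eq t co w hw j hj with hiff
      simp only [gt_iff_lt, ← hiff]
    · simp only [if_neg htj]
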